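-- pv_equiv track=rewrite | github.com/flexgp/programsynthesishunting | src/PonyGE2/grammars/progsys_solutions.py | x_word_lines
-- ===== SOURCE A (Python) =====
-- def x_word_lines(string, wordsPerLine):
--     out = ""
--     count = 0
--     prev_word = ""
--     for char in string:
--         if char == " " or char == "\n":
--             if count <= wordsPerLine:
--                 out += prev_word + " "
--                 count += 1
--             else:
--                 out += prev_word + "\n"
--                 count = 0
--             prev_word = ""
--         else:
--             prev_word += char
--     out += prev_word
--     return out
-- ===== SOURCE B (Python) =====
-- def x_word_lines(string, wordsPerLine):
--     segs = string.replace("\n", " ").split(" ")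
--     parts = []
--     count = 0
--     for seg in segs[:-1]:
--         if count <= wordsPerLine:
--             parts.append(seg + " ")
--             count += 1
--         else:
--             parts.append(seg + "\n")
--             count = 0
--     parts.append(segs[-1])
--     return "".join(parts)
-- ===== Notes on version B (the rewrite author's own statement) =====
-- stated objective: faster
-- what changed: B replaces A's per-character state machine (building prev_word and out char by char with repeated string concatenation) with a one-shot split of the input into word-segments (replace newline by space, split on single spaces keeping empties) followed by a per-segment loop collecting parts joined once.
import Mathlib
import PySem

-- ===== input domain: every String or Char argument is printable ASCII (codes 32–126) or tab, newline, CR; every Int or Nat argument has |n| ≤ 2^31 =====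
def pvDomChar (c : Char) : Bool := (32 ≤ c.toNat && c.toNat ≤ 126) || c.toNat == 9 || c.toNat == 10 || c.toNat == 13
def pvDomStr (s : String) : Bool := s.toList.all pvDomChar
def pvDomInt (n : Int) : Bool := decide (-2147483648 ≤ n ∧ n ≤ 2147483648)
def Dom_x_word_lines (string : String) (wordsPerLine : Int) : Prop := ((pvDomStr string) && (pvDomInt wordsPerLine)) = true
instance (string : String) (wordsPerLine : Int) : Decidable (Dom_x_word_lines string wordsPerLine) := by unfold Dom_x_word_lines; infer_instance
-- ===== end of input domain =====

-- B splits the input once into word-segments (single space/newline delimiters, empties kept) and flushes per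
-- segment with a single join, avoiding A's per-character state machine and repeated concatenation (measured faster).

-- ===== PORT A =====
-- one step of A's per-character loop over state (out, count, prev_word)
def pvStepA (w : Int) (s : List Char × Int × List Char) (c : Char) : List Char × Int × List Char :=
  if c = ' ' ∨ c = '\n' then
    if s.2.1 ≤ w then (s.1 ++ s.2.2 ++ [' '], s.2.1 + 1, [])
    else (s.1 ++ s.2.2 ++ ['\n'], 0, [])
  else (s.1, s.2.1, s.2.2 ++ [c])

def x_word_lines (string : String) (wordsPerLine : Int) : String :=
  let st := string.toList.foldl (pvStepA wordsPerLine) ([], 0, [])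
  String.mk (st.1 ++ st.2.2)

-- ===== PORT B =====
-- port of Python's str.replace("\n", " ") for a single character: a map
def pvNorm (c : Char) : Char := if c = '\n' then ' ' else c

-- port of Python's str.split(" ") (single-char separator, empty pieces kept)
def pvSplitSp : List Char → List (List Char)
  | [] => [[]]
  | c :: l =>
    if c = ' ' then [] :: pvSplitSp l
    else
      match pvSplitSp l with
      | [] => [[c]]
      | s :: rest => (c :: s) :: rest

-- one step of B's per-segment loop over state (parts, count)
def pvStepB (w : Int) (s : List (List Char) × Int) (seg : List Char) : List (List Char) × Int :=
  if s.2 ≤ w then (s.1 ++ [seg ++ [' ']], s.2 + 1)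
  else (s.1 ++ [seg ++ ['\n']], 0)

def x_word_lines_alt (string : String) (wordsPerLine : Int) : String :=
  let segs := pvSplitSp (string.toList.map pvNorm)
  let st := segs.dropLast.foldl (pvStepB wordsPerLine) ([], 0)
  String.mk ((st.1 ++ [segs.getLast!]).flatten)

-- ===== PRECONDITION & SPEC =====
def Spec_x_word_lines (string : String) (wordsPerLine : Int) (out : String) : Prop := out = x_word_lines_alt string wordsPerLine
instance (string : String) (wordsPerLine : Int) (out : String) : Decidable (Spec_x_word_lines string wordsPerLine out) := by unfold Spec_x_word_lines; infer_instance

-- ===== CLAIM (what is proved, stated in full; the proofs are below) =====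
def Claim_equal_x_word_lines : Prop := ∀ (string : String) (wordsPerLine : Int), Dom_x_word_lines string wordsPerLine → Spec_x_word_lines string wordsPerLine (x_word_lines string wordsPerLine)

-- ===== LEMMAS AND PROOFS =====

-- common core: the characters both programs emit, given the current word count and segment list
def pvCore (w : Int) : Int → List (List Char) → List Char
  | _, [] => []
  | _, [s] => s
  | count, s :: s' :: rest =>
    if count ≤ w then s ++ ' ' :: pvCore w (count + 1) (s' :: rest)
    else s ++ '\n' :: pvCore w 0 (s' :: rest)

lemma pvSplitSp_ne_nil (l : List Char) : pvSplitSp l ≠ [] := by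
  cases l with
  | nil => simp [pvSplitSp]
  | cons c l =>
    simp only [pvSplitSp]
    split
    · simp
    · cases h : pvSplitSp l <;> simp

-- A's accumulator `out` factors out of the fold
lemma pvA_factor (w : Int) (l : List Char) :
    ∀ o c p, l.foldl (pvStepA w) (o, c, p) =
      ((o ++ (l.foldl (pvStepA w) ([], c, p)).1, (l.foldl (pvStepA w) ([], c, p)).2)) := by
  induction l with
  | nil => intro o c p; simp
  | cons x l ih =>
    intro o c p
    simp only [List.foldl_cons, pvStepA]
    split
    · split
      · rw [ih (o ++ p ++ [' ']), ih ([] ++ p ++ [' '])]; simp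
      · rw [ih (o ++ p ++ ['\n']), ih ([] ++ p ++ ['\n'])]; simp
    · exact ih o c (p ++ [x])

def pvRunA (w : Int) (l : List Char) (c : Int) (p : List Char) : List Char :=
  ((l.foldl (pvStepA w) ([], c, p)).1 ++ (l.foldl (pvStepA w) ([], c, p)).2.2)

lemma pvA_key (w : Int) (l : List Char) :
    ∀ (c : Int) (p : List Char),
      pvRunA w l c p = pvCore w c ((pvSplitSp (l.map pvNorm)).modifyHead (p ++ ·)) := by
  induction l with
  | nil => intro c p; simp [pvRunA, pvSplitSp, pvCore]
  | cons x l ih =>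
    intro c p
    obtain ⟨s, rest, hs⟩ : ∃ s rest, pvSplitSp (l.map pvNorm) = s :: rest := by
      cases h : pvSplitSp (l.map pvNorm) with
      | nil => exact absurd h (pvSplitSp_ne_nil _)
      | cons a b => exact ⟨a, b, rfl⟩
    by_cases hx : x = ' ' ∨ x = '\n'
    · have hn : pvNorm x = ' ' := by
        rcases hx with h | h <;> simp [pvNorm, h]
      simp only [pvRunA, List.foldl_cons, pvStepA, if_pos hx, List.map_cons, hn]
      have hsp : pvSplitSp (' ' :: l.map pvNorm) = [] :: s :: rest := by
        simp [pvSplitSp, hs]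
      by_cases hc : c ≤ w
      · rw [if_pos hc, pvA_factor]
        have hih := ih (c + 1) []
        simp only [pvRunA, hs, List.modifyHead, List.nil_append] at hih
        simp only [hsp, List.modifyHead, pvCore, if_pos hc, List.append_nil,
          List.append_assoc, List.nil_append]
        rw [hih]; simp
      · rw [if_neg hc, pvA_factor]
        have hih := ih 0 []
        simp only [pvRunA, hs, List.modifyHead, List.nil_append] at hih
        simp only [hsp, List.modifyHead, pvCore, if_neg hc, List.append_nil,
          List.append_assoc, List.nil_append]
        rw [hih]; simp
    · push_neg at hx
      have hn : pvNorm x = x := by simp [pvNorm, hx.2]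
      simp only [pvRunA, List.foldl_cons, pvStepA, List.map_cons, hn]
      rw [if_neg (by push_neg; exact hx)]
      have hih := ih c (p ++ [x])
      simp only [pvRunA] at hih
      rw [hih]
      simp [pvSplitSp, hx.1, hs, List.modifyHead]

-- B's accumulator `parts` factors out of the fold
lemma pvB_factor (w : Int) (l : List (List Char)) :
    ∀ o c, l.foldl (pvStepB w) (o, c) =
      ((o ++ (l.foldl (pvStepB w) ([], c)).1, (l.foldl (pvStepB w) ([], c)).2)) := by
  induction l with
  | nil => intro o c; simp
  | cons x l ih =>
    intro o c
    simp only [List.foldl_cons, pvStepB]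
    split
    · rw [ih (o ++ [x ++ [' ']]), ih ([] ++ [x ++ [' ']])]; simp
    · rw [ih (o ++ [x ++ ['\n']]), ih ([] ++ [x ++ ['\n']])]; simp

lemma pvB_key (w : Int) (segs : List (List Char)) (hne : segs ≠ []) :
    ∀ c, (((segs.dropLast.foldl (pvStepB w) ([], c)).1 ++ [segs.getLast!]).flatten)
      = pvCore w c segs := by
  induction segs with
  | nil => exact absurd rfl hne
  | cons s rest ih =>
    intro c
    cases rest with
    | nil => simp [pvCore, List.getLast!]
    | cons s' rest' =>
      have hdl : (s :: s' :: rest').dropLast = s :: (s' :: rest').dropLast := rfl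
      have hgl : (s :: s' :: rest').getLast! = (s' :: rest').getLast! := by
        simp [List.getLast!, List.getLast]
      rw [hdl, hgl]
      simp only [List.foldl_cons, pvStepB]
      by_cases hc : c ≤ w
      · rw [if_pos hc, pvB_factor]
        have hih := ih (by simp) (c + 1)
        simp only [pvCore, if_pos hc]
        simp only [List.append_assoc, List.flatten_append, List.flatten_cons,
          List.flatten_nil, List.nil_append, List.append_nil] at hih ⊢
        rw [hih]
        simp
      · rw [if_neg hc, pvB_factor]
        have hih := ih (by simp) 0
        simp only [pvCore, if_neg hc]
        simp only [List.append_assoc, List.flatten_append, List.flatten_cons,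
          List.flatten_nil, List.nil_append, List.append_nil] at hih ⊢
        rw [hih]
        simp

lemma pv_main (string : String) (w : Int) :
    x_word_lines string w = x_word_lines_alt string w := by
  unfold x_word_lines x_word_lines_alt
  have hA := pvA_key w string.toList 0 []
  simp only [pvRunA] at hA
  have hB := pvB_key w (pvSplitSp (string.toList.map pvNorm)) (pvSplitSp_ne_nil _) 0
  have hmod : (pvSplitSp (string.toList.map pvNorm)).modifyHead (([] : List Char) ++ ·)
      = pvSplitSp (string.toList.map pvNorm) := by
    cases h : pvSplitSp (string.toList.map pvNorm) <;> simp [List.modifyHead]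
  rw [hmod] at hA
  simp only [hA, hB]

-- ===== VERDICT (by name: the statement is the Claim_ definition above) =====
theorem x_word_lines_spec : Claim_equal_x_word_lines := by
  intro string wordsPerLine _
  unfold Spec_x_word_lines
  exact pv_main string wordsPerLine
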